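-- pv_equiv track=rewrite | github.com/jlong5795/cs-module-project-hash-tables | applications/expensive_seq/hashtable.py | djb2
-- ===== SOURCE A (Python) =====
-- def djb2(key):
--     """
--     DJB2 hash, 32-bit
--
--     Implement this, and/or FNV-1.
--     """
--     hash = 5381
--     for c in key:
--         if c is type(int):
--             pass
--         else:
--             hash = (hash * 33) + ord(c)
--     return hash
-- ===== SOURCE B (Python) =====
-- def djb2(key):
--     vals = [ord(c) for c in key]
--     total = 0
--     p = 1
--     for v in reversed(vals):
--         total += v * p
--         p *= 33
--     return 5381 * p + total
-- ===== Notes on version B (the rewrite author's own statement) =====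
-- stated objective: alternative
-- what changed: Replaces the forward Horner accumulator by the closed form 5381*33^n plus a positionally weighted sum of character codes, built back-to-front with a running power of 33 (A's identity-test guard against type(int) is always false for a character and drops out).
import Mathlib
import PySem

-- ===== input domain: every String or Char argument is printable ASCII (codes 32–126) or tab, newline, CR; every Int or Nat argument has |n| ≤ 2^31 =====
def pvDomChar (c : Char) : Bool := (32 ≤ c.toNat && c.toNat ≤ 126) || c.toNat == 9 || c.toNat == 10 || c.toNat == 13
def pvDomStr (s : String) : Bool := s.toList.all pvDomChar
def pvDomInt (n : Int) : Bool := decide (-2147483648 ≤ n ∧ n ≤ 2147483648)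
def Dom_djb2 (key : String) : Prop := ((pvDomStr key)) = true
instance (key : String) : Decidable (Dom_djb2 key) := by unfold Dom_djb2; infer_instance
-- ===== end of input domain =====

-- B replaces A's forward Horner accumulator by the closed form 5381*33^n plus a weighted sum built back-to-front with a running power of 33; same value for every key.


-- ===== PORT A =====
-- Python's `c is type(int)` is identically false when c is a character, so the loop body is the else branch.
def djb2 (key : String) : Int :=
  key.toList.foldl (fun hash c => hash * 33 + (c.toNat : Int)) 5381

-- ===== PORT B =====
def djb2_alt (key : String) : Int :=
  let vals : List Int := key.toList.map (fun c => (c.toNat : Int))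
  let r := vals.reverse.foldl (fun (tp : Int × Int) v => (tp.1 + v * tp.2, tp.2 * 33)) (0, 1)
  5381 * r.2 + r.1

-- ===== PRECONDITION & SPEC =====
def Spec_djb2 (key : String) (out : Int) : Prop := out = djb2_alt key
instance (key : String) (out : Int) : Decidable (Spec_djb2 key out) := by unfold Spec_djb2; infer_instance

-- ===== CLAIM (what is proved, stated in full; the proofs are below) =====
def Claim_equal_djb2 : Prop := ∀ (key : String), Dom_djb2 key → Spec_djb2 key (djb2 key)

-- ===== LEMMAS AND PROOFS =====

/-- weighted sum with increasing powers of 33, head weight 33^0 -/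
def pvS : List Int → Int
  | [] => 0
  | v :: t => v + 33 * pvS t

theorem pvS_append (r : List Int) (c : Int) :
    pvS (r ++ [c]) = pvS r + c * 33 ^ r.length := by
  induction r with
  | nil => simp [pvS]
  | cons v t ih => simp [pvS, ih, pow_succ]; ring

theorem pvFoldB (l : List Int) : ∀ (t p : Int),
    l.foldl (fun (tp : Int × Int) v => (tp.1 + v * tp.2, tp.2 * 33)) (t, p)
      = (t + p * pvS l, p * 33 ^ l.length) := by
  induction l with
  | nil => intro t p; simp [pvS]
  | cons v r ih =>
    intro t p
    simp only [List.foldl_cons, ih, pvS, List.length_cons, pow_succ]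
    exact Prod.ext (by ring) (by ring)

theorem pvFoldA (l : List Int) : ∀ (h : Int),
    l.foldl (fun a v => a * 33 + v) h = h * 33 ^ l.length + pvS l.reverse := by
  induction l with
  | nil => intro h; simp [pvS]
  | cons v t ih =>
    intro h
    simp only [List.foldl_cons, ih, List.length_cons, List.reverse_cons, pvS_append,
      List.length_reverse, pow_succ]
    ring

-- ===== VERDICT (by name: the statement is the Claim_ definition above) =====
theorem djb2_spec : Claim_equal_djb2 := by
  intro key _
  unfold Spec_djb2 djb2 djb2_alt
  simp only []
  rw [show List.foldl (fun (hash : Int) (c : Char) => hash * 33 + (c.toNat : Int)) 5381 key.toList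
        = (key.toList.map (fun c => (c.toNat : Int))).foldl (fun a v => a * 33 + v) 5381
      from by rw [List.foldl_map]]
  rw [pvFoldA, pvFoldB]
  simp only [List.length_reverse, List.length_map]
  ring
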